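-- pv_equiv track=rewrite | github.com/xiw2-0/million-dollars | portfolios.py | num_portfolio_combinations
-- ===== SOURCE A (Python) =====
-- def num_portfolio_combinations(num_asset: int, num_weights: int) -> int:
--     dp = [[0 for _ in range(num_weights + 1)] for _ in range(2)]
--     # init
--     for i in range(len(dp[0])):
--         dp[0][i] = 1
--     # dp[i][j] = sum dp[i-1][k] for k in range(0, j+1)
--     for i in range(1, num_asset + 1):
--         for j in range(num_weights + 1):
--             dp[1][j] = sum(dp[0][:j + 1])
--         tmp = dp[0]
--         dp[0] = dp[1]
--         dp[1] = tmp
--     return dp[0][-1]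
-- ===== SOURCE B (Python) =====
-- def num_portfolio_combinations(num_asset: int, num_weights: int) -> int:
--     # closed form: the count is the multiset coefficient C(num_asset + num_weights, num_weights),
--     # computed by the exact rising-product formula (each division is exact).
--     result = 1
--     if num_asset > 0:
--         for k in range(1, num_weights + 1):
--             result = result * (num_asset + k) // k
--     return result
-- ===== Notes on version B (the rewrite author's own statement) =====
-- stated objective: faster
-- what changed: Replaced the two-row DP with repeated prefix re-summation by the binomial closed form C(num_asset+num_weights, num_weights), computed with one exact-division product loop.
import Mathlib
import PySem

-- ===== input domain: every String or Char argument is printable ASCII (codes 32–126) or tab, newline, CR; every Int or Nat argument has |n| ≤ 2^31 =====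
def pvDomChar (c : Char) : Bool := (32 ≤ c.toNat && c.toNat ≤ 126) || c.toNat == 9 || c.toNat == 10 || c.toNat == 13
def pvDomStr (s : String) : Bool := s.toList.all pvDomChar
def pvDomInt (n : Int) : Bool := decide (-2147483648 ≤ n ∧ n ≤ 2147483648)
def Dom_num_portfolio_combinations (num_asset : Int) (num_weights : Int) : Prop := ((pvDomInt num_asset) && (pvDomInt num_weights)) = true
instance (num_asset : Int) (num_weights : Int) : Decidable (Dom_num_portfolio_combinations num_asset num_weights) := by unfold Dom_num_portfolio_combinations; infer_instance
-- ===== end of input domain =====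

-- B replaces A's two-row prefix-sum DP by the binomial closed form C(num_asset+num_weights, num_weights)
-- computed with an exact-division product loop (measurably faster on large inputs).

-- ===== PORT A =====
def num_portfolio_combinations (num_asset : Int) (num_weights : Int) : Int :=
  -- dp = [[0 for _ in range(num_weights + 1)] for _ in range(2)]
  let dp0 : List Int := List.replicate (num_weights + 1).toNat 0
  let dp1 : List Int := List.replicate (num_weights + 1).toNat 0
  -- for i in range(len(dp[0])): dp[0][i] = 1
  let dp0 := (PySem.List.pyRange 0 (dp0.length : Int) 1).foldl
    (fun acc i => PySem.List.pySetD acc i 1) dp0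
  -- for i in range(1, num_asset + 1): inner loop, then swap dp[0] and dp[1]
  let st := (PySem.List.pyRange 1 (num_asset + 1) 1).foldl
    (fun (st : List Int × List Int) _i =>
      let d1 := (PySem.List.pyRange 0 (num_weights + 1) 1).foldl
        (fun acc j => PySem.List.pySetD acc j (PySem.List.slice st.1 none (some (j + 1))).sum) st.2
      (d1, st.1))
    (dp0, dp1)
  -- return dp[0][-1]; Pre_ excludes num_weights < 0, the only case where this is none (IndexError)
  (PySem.List.pyGet? st.1 (-1)).getD 0

-- ===== PORT B =====
def num_portfolio_combinations_alt (num_asset : Int) (num_weights : Int) : Int :=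
  -- result = 1; if num_asset > 0: for k in range(1, num_weights+1): result = result*(num_asset+k)//k
  if num_asset > 0 then
    (PySem.List.pyRange 1 (num_weights + 1) 1).foldl
      (fun result k => PySem.Int.floordiv (result * (num_asset + k)) k) 1
  else 1

-- ===== PRECONDITION & SPEC =====
-- A raises IndexError on num_weights < 0 (dp rows are empty, dp[0][-1]); those inputs are excluded.
def Pre_num_portfolio_combinations (num_asset : Int) (num_weights : Int) : Prop := 0 ≤ num_weights
instance (num_asset : Int) (num_weights : Int) : Decidable (Pre_num_portfolio_combinations num_asset num_weights) := by unfold Pre_num_portfolio_combinations; infer_instance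
def pvWitness_num_portfolio_combinations : Int × Int := (3, 4)

def Spec_num_portfolio_combinations (num_asset : Int) (num_weights : Int) (out : Int) : Prop := out = num_portfolio_combinations_alt num_asset num_weights
instance (num_asset : Int) (num_weights : Int) (out : Int) : Decidable (Spec_num_portfolio_combinations num_asset num_weights out) := by unfold Spec_num_portfolio_combinations; infer_instance

-- ===== CLAIM (what is proved, stated in full; the proofs are below) =====
def Claim_equal_num_portfolio_combinations : Prop := ∀ (num_asset : Int) (num_weights : Int), Dom_num_portfolio_combinations num_asset num_weights → Pre_num_portfolio_combinations num_asset num_weights → Spec_num_portfolio_combinations num_asset num_weights (num_portfolio_combinations num_asset num_weights)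

-- ===== LEMMAS AND PROOFS =====

def pvRow (i W : ℕ) : List Int := (List.range (W + 1)).map (fun j => ((i + j).choose j : Int))

theorem pv_foldl_set (g : ℕ → Int) : ∀ (m : ℕ) (init : List Int), m ≤ init.length →
    (List.range m).foldl (fun acc j => acc.set j (g j)) init
      = ((List.range m).map g) ++ init.drop m := by
  intro m
  induction m with
  | zero => simp
  | succ m ih =>
    intro init h
    rw [List.range_succ, List.foldl_append, ih init (by omega)]
    simp only [List.foldl_cons, List.foldl_nil, List.set_append]
    have hlen : ((List.range m).map g).length = m := by simp
    rw [if_neg (by omega)]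
    have hdrop : init.drop m = init[m] :: init.drop (m + 1) := List.drop_eq_getElem_cons (by omega)
    rw [hlen]
    simp only [Nat.sub_self, hdrop, List.set_cons_zero, List.map_append]
    simp

theorem pv_hockey (t : ℕ) : ∀ j : ℕ,
    (((List.range (j + 1)).map (fun k => ((t + k).choose k : Int))).sum)
      = ((t + j + 1).choose j : Int) := by
  intro j
  induction j with
  | zero => simp
  | succ j ih =>
    rw [List.range_succ, List.map_append, List.sum_append, ih]
    simp only [List.map_cons, List.map_nil, List.sum_cons, List.sum_nil, add_zero]
    norm_cast

theorem pv_inner (W t : ℕ) (d1 : List Int) (hd : d1.length = W + 1) :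
    (PySem.List.pyRange 0 ((W : Int) + 1) 1).foldl
      (fun acc j => PySem.List.pySetD acc j (PySem.List.slice (pvRow t W) none (some (j + 1))).sum) d1
      = pvRow (t + 1) W := by
  have hcast : (W : Int) + 1 = ((W + 1 : ℕ) : Int) := by push_cast; ring
  rw [hcast, PySem.List.pyRange_zero_nat, List.foldl_map]
  have hstep : ∀ (acc : List Int) (j : ℕ), j < W + 1 →
      PySem.List.pySetD acc (j : Int) (PySem.List.slice (pvRow t W) none (some ((j : Int) + 1))).sum
        = acc.set j (((t + 1 + j).choose j : Int)) := by
    intro acc j hj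
    have h1 : ((j : Int) + 1) = ((j + 1 : ℕ) : Int) := by push_cast; ring
    rw [PySem.List.pySetD_natCast, h1, PySem.List.slice_to_natCast]
    congr 1
    unfold pvRow
    rw [← List.map_take, List.take_range, min_eq_left (by omega)]
    rw [pv_hockey t j, show t + j + 1 = t + 1 + j from by omega]
  rw [PySem.List.foldl_congr_mem (List.range (W + 1)) _
        (fun acc j => acc.set j (((t + 1 + j).choose j : Int))) d1
        (fun acc j hj => hstep acc j (List.mem_range.mp hj))]
  rw [pv_foldl_set _ (W + 1) d1 (by omega)]
  simp [pvRow, hd]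
theorem pv_prod (N : ℕ) (na : Int) (hn : na = (N : Int)) : ∀ m : ℕ,
    (PySem.List.pyRange 1 ((m : Int) + 1) 1).foldl
      (fun result k => PySem.Int.floordiv (result * (na + k)) k) 1
      = ((N + m).choose m : Int) := by
  intro m
  induction m with
  | zero => simp [PySem.List.pyRange_one_eq_nil]
  | succ m ih =>
    have hsplit : PySem.List.pyRange 1 (((m : Int) + 1) + 1) 1
        = PySem.List.pyRange 1 ((m : Int) + 1) 1 ++ [(m : Int) + 1] :=
      PySem.List.pyRange_one_succ_right (by omega)
    rw [show ((m + 1 : ℕ) : Int) + 1 = (((m : Int) + 1) + 1) from by push_cast; ring,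
        hsplit, List.foldl_append, ih]
    simp only [List.foldl_cons, List.foldl_nil]
    rw [hn]
    have h1 : ((N + m).choose m : Int) * ((N : Int) + ((m : Int) + 1))
        = (((N + m).choose m * (N + m + 1) : ℕ) : Int) := by push_cast; ring
    rw [h1, show ((m : Int) + 1) = ((m + 1 : ℕ) : Int) from by push_cast; ring,
        PySem.Int.floordiv_natCast]
    congr 1
    rw [Nat.mul_comm, Nat.add_one_mul_choose_eq (N + m) m, Nat.mul_div_cancel _ (by omega)]
    congr 1

theorem pv_outer (W : ℕ) (nw : Int) (hw : nw = (W : Int)) :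
    ∀ (l : List Int) (t : ℕ) (d1 : List Int), d1.length = W + 1 →
    (l.foldl (fun (st : List Int × List Int) _i =>
      let d1 := (PySem.List.pyRange 0 (nw + 1) 1).foldl
        (fun acc j => PySem.List.pySetD acc j (PySem.List.slice st.1 none (some (j + 1))).sum) st.2
      (d1, st.1)) (pvRow t W, d1))
      = (pvRow (t + l.length) W, if l = [] then d1 else pvRow (t + l.length - 1) W) := by
  intro l
  induction l with
  | nil => intro t d1 hd; simp
  | cons a l ih =>
    intro t d1 hd
    rw [List.foldl_cons]
    have hstep : ((PySem.List.pyRange 0 (nw + 1) 1).foldl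
        (fun acc j => PySem.List.pySetD acc j (PySem.List.slice (pvRow t W) none (some (j + 1))).sum) d1)
        = pvRow (t + 1) W := by
      rw [hw]; exact pv_inner W t d1 hd
    simp only [hstep]
    rw [ih (t + 1) (pvRow t W) (by simp [pvRow])]
    rcases l with _ | ⟨b, l⟩
    · simp
    · rw [if_neg (by simp), if_neg (by simp)]
      refine Prod.ext ?_ ?_ <;> · simp only [List.length_cons]; congr 1; omega

-- ===== VERDICT (by name: the statement is the Claim_ definition above) =====
theorem num_portfolio_combinations_spec : Claim_equal_num_portfolio_combinations := by
  intro na nw _ hpre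
  unfold Spec_num_portfolio_combinations
  have hw : nw = (nw.toNat : Int) := by
    have : (0:Int) ≤ nw := hpre
    omega
  set W := nw.toNat with hWdef
  have hWt : (nw + 1).toNat = W + 1 := by omega
  -- A computes C(na.toNat + W, W)
  have hA : num_portfolio_combinations na nw = (((na.toNat + W).choose W : ℕ) : Int) := by
    simp only [num_portfolio_combinations, hWt]
    have hinit : List.foldl (fun acc i => PySem.List.pySetD acc i 1)
        (List.replicate (W + 1) (0 : Int))
        (PySem.List.pyRange 0 ((List.replicate (W + 1) (0 : Int)).length : Int) 1)
        = pvRow 0 W := by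
      rw [List.length_replicate, PySem.List.pyRange_zero_nat, List.foldl_map]
      rw [PySem.List.foldl_congr_mem (List.range (W + 1)) _
            (fun acc (j : ℕ) => acc.set j (1 : Int)) _
            (by intro acc j hj; simp)]
      rw [pv_foldl_set (fun _ => (1 : Int)) (W + 1) _ (by simp)]
      simp [pvRow]
    rw [hinit]
    rw [pv_outer W nw hw (PySem.List.pyRange 1 (na + 1) 1) 0 (List.replicate (W + 1) 0) (by simp)]
    have hlen : (PySem.List.pyRange 1 (na + 1) 1).length = na.toNat := by
      rw [PySem.List.length_pyRange_one]; omega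
    have hlast : PySem.List.pyGet? (pvRow (0 + (PySem.List.pyRange 1 (na + 1) 1).length) W) (-1)
        = some (((na.toNat + W).choose W : ℕ) : Int) := by
      rw [hlen, Nat.zero_add]
      unfold pvRow
      rw [List.range_succ, List.map_append, List.map_singleton]
      exact PySem.List.pyGet?_neg_one_append_singleton _ _
    simp only [hlast, Option.getD_some]
  rw [hA]
  by_cases h : na > 0
  · simp only [num_portfolio_combinations_alt, if_pos h]
    have hn : na = (na.toNat : Int) := by omega
    rw [hw, pv_prod na.toNat na hn W]
  · simp only [num_portfolio_combinations_alt, if_neg h]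
    have : na.toNat = 0 := by omega
    simp [this]
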